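-- pv_equiv track=rewrite | github.com/Yousha-dev/crypto-intelligence-platform | src/myapp/oldfetchers/reddit.py | has_repeated_phrases
-- ===== SOURCE A (Python) =====
-- def has_repeated_phrases(text):
--     """Check for repeated phrases that might indicate spam"""
--     words = text.split()
--     if len(words) < 10:
--         return False
--
--     # Check for repeated 3-word phrases
--     phrases = [' '.join(words[i:i+3]) for i in range(len(words)-2)]
--     phrase_counts = {}
--     for phrase in phrases:
--         phrase_counts[phrase] = phrase_counts.get(phrase, 0) + 1
--
--     return any(count > 2 for count in phrase_counts.values())
-- ===== SOURCE B (Python) =====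
-- def has_repeated_phrases(text):
--     """Check for repeated phrases that might indicate spam (sort + run scan)."""
--     words = text.split()
--     if len(words) < 10:
--         return False
--     phrases = sorted(' '.join(words[i:i+3]) for i in range(len(words) - 2))
--     prev = phrases[0]
--     run = 1
--     for cur in phrases[1:]:
--         run = run + 1 if cur == prev else 1
--         if run == 3:
--             return True
--         prev = cur
--     return False
-- ===== Notes on version B (the rewrite author's own statement) =====
-- stated objective: alternative
-- what changed: Replaced the dict-of-phrase-counts plus any(count>2) with sorting the 3-word phrases and a single linear scan over the sorted list maintaining a run-length counter that returns True as soon as a run of 3 equal phrases is seen.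
import Mathlib
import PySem

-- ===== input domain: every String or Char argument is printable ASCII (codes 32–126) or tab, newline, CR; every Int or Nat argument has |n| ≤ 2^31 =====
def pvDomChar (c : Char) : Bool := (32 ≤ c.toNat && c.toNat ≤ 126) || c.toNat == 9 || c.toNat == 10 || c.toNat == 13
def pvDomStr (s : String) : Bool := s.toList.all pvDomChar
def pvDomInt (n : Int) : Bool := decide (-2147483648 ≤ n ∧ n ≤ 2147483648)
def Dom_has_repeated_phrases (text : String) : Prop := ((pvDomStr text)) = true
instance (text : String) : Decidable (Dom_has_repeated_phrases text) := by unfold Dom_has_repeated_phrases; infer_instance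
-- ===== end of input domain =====

-- B replaces A's dict of phrase counts with sort-then-run-length scan; same return value (alternative decomposition, not claimed faster).

-- ===== PORT A =====
def has_repeated_phrases (text : String) : Bool :=
  let words := PySem.Str.split₀ text
  if words.length < 10 then false
  else
    let phrases := (PySem.List.pyRange 0 ((words.length : Int) - 2) 1).map
      (fun i => PySem.Str.join " " (PySem.List.slice words (some i) (some (i + 3))))
    let counts : PySem.Dict String Int := phrases.foldl (fun d p => d.insert p (d.getD p 0 + 1)) PySem.Dict.empty
    counts.values.any (fun c => decide (2 < c))

-- ===== PORT B =====
-- the run-length scan over the sorted phrase list (B's for-loop with early return)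
def pvScanRun : List String → String → Nat → Bool
  | [], _, _ => false
  | cur :: rest, prev, run =>
    let run' := if cur = prev then run + 1 else 1
    if run' = 3 then true else pvScanRun rest cur run'

def has_repeated_phrases_alt (text : String) : Bool :=
  let words := PySem.Str.split₀ text
  if words.length < 10 then false
  else
    let phrases := (PySem.List.pyRange 0 ((words.length : Int) - 2) 1).map
      (fun i => PySem.Str.join " " (PySem.List.slice words (some i) (some (i + 3))))
    match PySem.List.sorted phrases (fun x => x) false with
    | [] => false
    | p :: rest => pvScanRun rest p 1

-- ===== PRECONDITION & SPEC =====
def Spec_has_repeated_phrases (text : String) (out : Bool) : Prop := out = has_repeated_phrases_alt text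
instance (text : String) (out : Bool) : Decidable (Spec_has_repeated_phrases text out) := by unfold Spec_has_repeated_phrases; infer_instance

-- ===== CLAIM (what is proved, stated in full; the proofs are below) =====
def Claim_equal_has_repeated_phrases : Prop := ∀ (text : String), Dom_has_repeated_phrases text → Spec_has_repeated_phrases text (has_repeated_phrases text)

-- ===== LEMMAS AND PROOFS =====

-- On a ≤-sorted list, the run-length scan finds a run of 3 iff some element has count ≥ 3.
lemma pvScanRun_iff (t : List String) : ∀ p : String, (p :: t).Pairwise (· ≤ ·) →
    ((pvScanRun t p 1 = true ↔ ∃ k, 3 ≤ (p :: t).count k) ∧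
     (pvScanRun t p 2 = true ↔ ∃ k, 3 ≤ (p :: p :: t).count k)) := by
  induction t with
  | nil =>
      intro p _
      constructor
      · simp only [pvScanRun, Bool.false_eq_true, false_iff]
        rintro ⟨k, hk⟩
        have := List.count_le_length (l := [p]) (a := k)
        simp at this; omega
      · simp only [pvScanRun, Bool.false_eq_true, false_iff]
        rintro ⟨k, hk⟩
        have := List.count_le_length (l := [p, p]) (a := k)
        simp at this; omega
  | cons x t ih =>
      intro p hpw
      have hpw' : (x :: t).Pairwise (· ≤ ·) := hpw.of_cons
      have hle : ∀ y ∈ x :: t, p ≤ y := (List.pairwise_cons.mp hpw).1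
      obtain ⟨ih1, ih2⟩ := ih x hpw'
      have hcount0 : x ≠ p → (x :: t).count p = 0 := by
        intro hxp
        have hplt : p < x := lt_of_le_of_ne (hle x List.mem_cons_self) (fun h => hxp h.symm)
        apply List.count_eq_zero_of_not_mem
        intro hm
        rcases List.mem_cons.mp hm with h | h
        · exact absurd h.symm hplt.ne'
        · exact absurd ((List.pairwise_cons.mp hpw').1 p h) (not_le.mpr hplt)
      constructor
      · by_cases hxp : x = p
        · subst hxp
          simp only [pvScanRun]
          norm_num
          exact ih2
        · simp only [pvScanRun, if_neg hxp]
          norm_num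
          rw [ih1]
          constructor
          · rintro ⟨k, hk⟩
            refine ⟨k, ?_⟩
            have : (p :: x :: t).count k = (x :: t).count k + if p = k then 1 else 0 := by
              simp [List.count_cons]
            omega
          · rintro ⟨k, hk⟩
            by_cases hkp : k = p
            · subst hkp
              have h0 := hcount0 hxp
              have : (k :: x :: t).count k = (x :: t).count k + 1 := by simp [List.count_cons]
              omega
            · refine ⟨k, ?_⟩
              have hpk : p ≠ k := fun h => hkp h.symm
              have : (p :: x :: t).count k = (x :: t).count k := by
                simp [List.count_cons, hpk]
              omega
      · by_cases hxp : x = p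
        · subst hxp
          simp only [pvScanRun]
          norm_num
          refine ⟨x, ?_⟩
          have : (x :: x :: x :: t).count x = t.count x + 3 := by simp
          omega
        · simp only [pvScanRun, if_neg hxp]
          norm_num
          rw [ih1]
          constructor
          · rintro ⟨k, hk⟩
            refine ⟨k, ?_⟩
            have : (p :: p :: x :: t).count k = (x :: t).count k + if p = k then 2 else 0 := by
              by_cases hpk : p = k <;> simp [List.count_cons, hpk]
            omega
          · rintro ⟨k, hk⟩
            by_cases hkp : k = p
            · subst hkp
              have h0 := hcount0 hxp
              have : (k :: k :: x :: t).count k = (x :: t).count k + 2 := by simp [List.count_cons]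
              omega
            · refine ⟨k, ?_⟩
              have hpk : p ≠ k := fun h => hkp h.symm
              have : (p :: p :: x :: t).count k = (x :: t).count k := by
                simp [List.count_cons, hpk]
              omega

-- A's counter-and-any tail equals B's sort-and-scan tail, for any phrase list.
lemma pvCounter_eq_scan (l : List String) :
    (((l.foldl (fun d p => d.insert p (d.getD p 0 + 1)) PySem.Dict.empty : PySem.Dict String Int)).values.any
      (fun c => decide (2 < c)))
    = (match PySem.List.sorted l (fun x => x) false with
       | [] => false
       | p :: rest => pvScanRun rest p 1) := by
  have hA : (((l.foldl (fun d p => d.insert p (d.getD p 0 + 1)) PySem.Dict.empty : PySem.Dict String Int)).values.any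
      (fun c => decide (2 < c))) = true ↔ ∃ k, 3 ≤ l.count k := by
    rw [PySem.Dict.foldl_insert_getD_add_one_eq_counter]
    simp only [PySem.Dict.values, PySem.Dict.items_counter, List.map_map, List.any_eq_true,
      List.mem_map, Function.comp_apply, decide_eq_true_eq]
    constructor
    · rintro ⟨c, ⟨k, hkmem, rfl⟩, h2⟩
      exact ⟨k, by omega⟩
    · rintro ⟨k, hk⟩
      refine ⟨(l.count k : Int), ⟨k, ?_, rfl⟩, by omega⟩
      simp [PySem.Set.mem_ofList]
      exact List.count_pos_iff.mp (by omega)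
  have hB : (match PySem.List.sorted l (fun x => x) false with
       | [] => false
       | p :: rest => pvScanRun rest p 1) = true ↔ ∃ k, 3 ≤ l.count k := by
    rcases hs : PySem.List.sorted l (fun x => x) false with _ | ⟨p, rest⟩
    · have hl : l = [] := by
        have := PySem.List.sorted_eq_nil_iff (xs := l) (key := fun x => x) (rev := false)
        exact this.mp hs
      subst hl
      simp
    · have hpair : (p :: rest).Pairwise (fun a b => a ≤ b) := by
        have := PySem.List.sorted_pairwise (xs := l) (key := fun x => x)
        rw [hs] at this; exact this
      have hperm : (p :: rest).Perm l := by
        have := PySem.List.sorted_perm (xs := l) (key := fun x => x) (rev := false)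
        rw [hs] at this; exact this
      simp only []
      rw [(pvScanRun_iff rest p hpair).1]
      exact exists_congr fun k => by rw [hperm.count_eq]
  exact Bool.eq_iff_iff.mpr (hA.trans hB.symm)

-- ===== VERDICT (by name: the statement is the Claim_ definition above) =====
theorem has_repeated_phrases_spec : Claim_equal_has_repeated_phrases := by
  intro text _
  unfold Spec_has_repeated_phrases has_repeated_phrases has_repeated_phrases_alt
  by_cases h : (PySem.Str.split₀ text).length < 10
  · simp [h]
  · simp only [if_neg h]
    exact pvCounter_eq_scan _
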